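-- pv_equiv track=rewrite | github.com/annalaurams/Analise-de-Desempenho-de-Algoritmos-de-Busca | dfs.py | get_permitted_moves
-- ===== SOURCE A (Python) =====
-- def get_permitted_moves(cell):
--     moves = {
--         "left": [0, -1],
--         "right": [0, 1],
--         "up": [-1, 0],
--         "down": [1, 0]
--     }
--
--     for i, char in enumerate(cell):
--         if char == '?':
--             if i == 0:
--                 moves.pop("down", None)  # parede abaixo
--             else:
--                 moves.pop("up", None)    # parede acima
--         elif char == '!':
--             if i == 0:
--                 moves.pop("left", None)  # parede na esquerda
--             else:
--                 moves.pop("right", None) # parede na direita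
--
--     return list(moves.values())
-- ===== SOURCE B (Python) =====
-- def get_permitted_moves(cell):
--     head, rest = cell[:1], cell[1:]
--     options = [
--         ([0, -1], head != '!'),
--         ([0, 1], '!' not in rest),
--         ([-1, 0], '?' not in rest),
--         ([1, 0], head != '?'),
--     ]
--     return [move for move, ok in options if ok]
-- ===== Notes on version B (the rewrite author's own statement) =====
-- stated objective: simpler
-- what changed: Instead of scanning characters one by one and mutating a moves dict, B reads four wall flags from cell[:1] and cell[1:] ('?'/'!' at position 0 vs later) and filters the fixed list of direction vectors by those flags.
import Mathlib
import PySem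

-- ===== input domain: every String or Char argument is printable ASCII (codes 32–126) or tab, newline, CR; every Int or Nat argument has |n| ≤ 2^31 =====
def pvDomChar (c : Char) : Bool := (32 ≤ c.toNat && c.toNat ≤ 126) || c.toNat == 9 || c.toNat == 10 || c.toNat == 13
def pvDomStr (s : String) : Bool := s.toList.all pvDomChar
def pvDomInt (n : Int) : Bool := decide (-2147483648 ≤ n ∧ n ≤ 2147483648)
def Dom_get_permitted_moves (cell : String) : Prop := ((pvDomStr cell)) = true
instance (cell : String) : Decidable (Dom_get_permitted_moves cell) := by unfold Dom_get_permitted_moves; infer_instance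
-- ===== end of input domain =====

-- B replaces A's character-by-character dict mutation with four wall flags read off
-- cell[:1] / cell[1:] and a single filter over the direction vectors (objective: simpler).

-- ===== PORT A =====
-- the initial moves dict {"left": [0,-1], "right": [0,1], "up": [-1,0], "down": [1,0]}
def pvMovesInit : PySem.Dict String (List Int) :=
  ((((PySem.Dict.empty).insert "left" [0, -1]).insert "right" [0, 1]).insert
      "up" [-1, 0]).insert "down" [1, 0]

-- the body of A's for-loop: moves.pop(key, None) is Dict.erase (never raises)
def pvStepA (moves : PySem.Dict String (List Int)) (p : Int × Char) :
    PySem.Dict String (List Int) :=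
  if p.2 = '?' then
    if p.1 = 0 then moves.erase "down" else moves.erase "up"
  else if p.2 = '!' then
    if p.1 = 0 then moves.erase "left" else moves.erase "right"
  else moves

def get_permitted_moves (cell : String) : List (List Int) :=
  ((PySem.List.enumerate cell.toList 0).foldl pvStepA pvMovesInit).values

-- ===== PORT B =====
-- the list 'options' of Source B: (move vector, keep-it flag) pairs
def pvOptions (cs : List Char) : List (List Int × Bool) :=
  [([0, -1], PySem.Chars.slice cs none (some 1) ≠ ['!']),
   ([0, 1], PySem.Chars.isIn ['!'] (PySem.Chars.slice cs (some 1) none) = false),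
   ([-1, 0], PySem.Chars.isIn ['?'] (PySem.Chars.slice cs (some 1) none) = false),
   ([1, 0], PySem.Chars.slice cs none (some 1) ≠ ['?'])]

def get_permitted_moves_alt (cell : String) : List (List Int) :=
  (pvOptions cell.toList).filterMap (fun p => if p.2 then some p.1 else none)

-- ===== PRECONDITION & SPEC =====
def Spec_get_permitted_moves (cell : String) (out : List (List Int)) : Prop := out = get_permitted_moves_alt cell
instance (cell : String) (out : List (List Int)) : Decidable (Spec_get_permitted_moves cell out) := by unfold Spec_get_permitted_moves; infer_instance

-- ===== CLAIM (what is proved, stated in full; the proofs are below) =====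
def Claim_equal_get_permitted_moves : Prop := ∀ (cell : String), Dom_get_permitted_moves cell → Spec_get_permitted_moves cell (get_permitted_moves cell)

-- ===== LEMMAS AND PROOFS =====

theorem pvErase_idem (d : PySem.Dict String (List Int)) (k : String) :
    (d.erase k).erase k = d.erase k := by
  simp [PySem.Dict.erase]

theorem pvErase_comm (d : PySem.Dict String (List Int)) (k j : String) :
    (d.erase k).erase j = (d.erase j).erase k := by
  simp [PySem.Dict.erase]
  exact List.filter_congr (fun x _ => Bool.and_comm _ _)

theorem pvIsIn_singleton (c : Char) (l : List Char) :
    PySem.Chars.isIn [c] l = true ↔ c ∈ l := by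
  rw [PySem.Chars.isIn_iff_infix]
  constructor
  · rintro ⟨s, t, h⟩; subst h; simp
  · intro h
    obtain ⟨s, t, h⟩ := List.append_of_mem h
    exact ⟨s, t, by simp [h]⟩

theorem pvIsIn_contains (c : Char) (l : List Char) :
    PySem.Chars.isIn [c] l = l.contains c := by
  rw [Bool.eq_iff_iff, pvIsIn_singleton]
  simp

-- A's loop on the tail (indices ≥ 1) only ever erases "up" (on '?') and "right" (on '!')
theorem pvTailFold (rest : List Char) (d : PySem.Dict String (List Int)) (k : Int)
    (hk : 1 ≤ k) :
    (PySem.List.enumerate rest k).foldl pvStepA d =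
      if rest.contains '?' then
        (if rest.contains '!' then (d.erase "up").erase "right" else d.erase "up")
      else
        (if rest.contains '!' then d.erase "right" else d) := by
  induction rest generalizing d k with
  | nil => simp [PySem.List.enumerate]
  | cons c rest ih =>
    rw [PySem.List.enumerate_cons, List.foldl_cons]
    have hk0 : ¬ ((k, c).1 = 0) := by simp; omega
    by_cases h1 : c = '?'
    · subst h1
      have hstep : pvStepA d (k, '?') = d.erase "up" := by simp [pvStepA, hk0]
      rw [hstep, ih _ (k + 1) (by omega)]
      simp only [List.contains_cons]
      norm_num
      split_ifs <;> first | rfl | tauto | simp [pvErase_idem, pvErase_comm d "up" "right"]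
    · by_cases h2 : c = '!'
      · subst h2
        have hstep : pvStepA d (k, '!') = d.erase "right" := by simp [pvStepA, hk0]
        rw [hstep, ih _ (k + 1) (by omega)]
        simp only [List.contains_cons]
        norm_num
        split_ifs <;> first | rfl | tauto | simp [pvErase_idem, pvErase_comm d "right" "up"]
      · have hstep : pvStepA d (k, c) = d := by simp [pvStepA, h1, h2]
        rw [hstep, ih _ (k + 1) (by omega)]
        simp only [List.contains_cons]
        have e1 : (('?' : Char) == c) = false := by simp [Ne.symm h1]
        have e2 : (('!' : Char) == c) = false := by simp [Ne.symm h2]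
        rw [e1, e2]
        simp

-- ===== VERDICT (by name: the statement is the Claim_ definition above) =====
theorem get_permitted_moves_spec : Claim_equal_get_permitted_moves := by
  intro cell _
  unfold Spec_get_permitted_moves get_permitted_moves get_permitted_moves_alt
  cases hcs : cell.toList with
  | nil => decide
  | cons c rest =>
    rw [PySem.List.enumerate_cons, List.foldl_cons]
    have hhead : PySem.Chars.slice (c :: rest) none (some 1) = [c] := by
      simpa using PySem.List.slice_to_natCast (c :: rest) 1
    have htail : PySem.Chars.slice (c :: rest) (some 1) none = rest := by
      simp [PySem.List.slice_from_one]
    have h01 : (0 : Int) + 1 = 1 := by norm_num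
    rw [h01, pvTailFold rest _ 1 (by omega)]
    by_cases hc1 : c = '?' <;> by_cases hc2 : c = '!' <;>
      by_cases hq : rest.contains '?' = true <;> by_cases hb : rest.contains '!' = true <;>
      simp_all [pvStepA, pvOptions, pvIsIn_contains, pvMovesInit] <;> decide
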